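-- pv_equiv track=rewrite | github.com/SohamGhorpade326/tenzorx | backend/agents/transcript_agent.py | _normalize_owner
-- ===== SOURCE A (Python) =====
-- from typing import List, Optional
--
-- def _normalize_owner(owner: str, known_names: List[str]) -> str:
--     if not owner:
--         return "UNASSIGNED"
--
--     if owner.upper() == "UNASSIGNED":
--         return "UNASSIGNED"
--
--     if not known_names:
--         return owner
--
--     lower = owner.lower()
--     for name in known_names:
--         if lower == name.lower():
--             return name
--
--     owner_tokens = set(lower.split())
--     best_name = None
--     best_overlap = 0
--     for name in known_names:
--         name_tokens = set(name.lower().split())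
--         overlap = len(owner_tokens & name_tokens)
--         if overlap > best_overlap:
--             best_overlap = overlap
--             best_name = name
--
--     if best_name and best_overlap > 0:
--         return best_name
--
--     return "UNASSIGNED"
-- ===== SOURCE B (Python) =====
-- from typing import List
--
--
-- def _normalize_owner(owner: str, known_names: List[str]) -> str:
--     if not owner or owner.upper() == "UNASSIGNED":
--         return "UNASSIGNED"
--     if not known_names:
--         return owner
--
--     lower = owner.lower()
--     owner_tokens = set(lower.split())
--     best_name, best_overlap = "UNASSIGNED", 0
--     for name in known_names:
--         if name.lower() == lower:
--             return name
--         overlap = len(owner_tokens & set(name.lower().split()))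
--         if overlap > best_overlap:
--             best_name, best_overlap = name, overlap
--     return best_name
-- ===== Notes on version B (the rewrite author's own statement) =====
-- stated objective: simpler
-- what changed: Fuses A's two sequential scans (exact-match scan, then best-overlap scan with an Optional best and a final truthiness check) into one loop that returns on an exact match and otherwise maintains best_name initialised to 'UNASSIGNED', removing the second pass, the Optional state and the trailing guard.
import Mathlib
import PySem

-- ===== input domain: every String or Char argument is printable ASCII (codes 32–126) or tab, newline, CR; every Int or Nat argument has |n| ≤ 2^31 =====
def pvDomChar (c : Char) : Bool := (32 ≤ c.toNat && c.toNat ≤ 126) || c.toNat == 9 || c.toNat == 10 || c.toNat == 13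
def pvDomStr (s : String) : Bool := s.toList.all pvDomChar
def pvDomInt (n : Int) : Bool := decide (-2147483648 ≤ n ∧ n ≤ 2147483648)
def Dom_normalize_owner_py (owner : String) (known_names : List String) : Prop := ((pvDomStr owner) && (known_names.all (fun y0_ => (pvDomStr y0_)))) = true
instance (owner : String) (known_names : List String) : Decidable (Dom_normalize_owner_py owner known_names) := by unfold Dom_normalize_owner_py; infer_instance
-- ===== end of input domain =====

-- B fuses A's two sequential scans into one loop (objective: simpler — no Optional state, no final guard).

-- ===== PORT A =====
-- first loop of A: return the first name whose lowercase equals `lower`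
def pvExactScan (lower : String) : List String → Option String
  | [] => none
  | name :: rest =>
    if lower = PySem.Str.lower name then some name else pvExactScan lower rest

-- second loop of A: track (best_name : Option, best_overlap)
def pvOverlapLoop (owner_tokens : PySem.Set String) :
    List String → Option String × Int → Option String × Int
  | [], st => st
  | name :: rest, st =>
    let name_tokens := PySem.Set.ofList (PySem.Str.split₀ (PySem.Str.lower name))
    let overlap := PySem.Set.len (PySem.Set.inter owner_tokens name_tokens)
    pvOverlapLoop owner_tokens rest
      (if overlap > st.2 then (some name, overlap) else st)

def normalize_owner_py (owner : String) (known_names : List String) : String :=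
  if owner = "" then "UNASSIGNED"
  else if PySem.Str.upper owner = "UNASSIGNED" then "UNASSIGNED"
  else if known_names = [] then owner
  else
    let lower := PySem.Str.lower owner
    match pvExactScan lower known_names with
    | some name => name
    | none =>
      let owner_tokens := PySem.Set.ofList (PySem.Str.split₀ lower)
      let st := pvOverlapLoop owner_tokens known_names (none, 0)
      match st.1 with
      | some best_name =>
        -- Python: `if best_name and best_overlap > 0` (truthiness of the string)
        if best_name ≠ "" ∧ 0 < st.2 then best_name else "UNASSIGNED"
      | none => "UNASSIGNED"

-- ===== PORT B =====
-- single loop of B: early return on exact match, else keep the strictly best overlap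
def pvAltLoop (lower : String) (owner_tokens : PySem.Set String) :
    List String → String → Int → String
  | [], best_name, _ => best_name
  | name :: rest, best_name, best_overlap =>
    if PySem.Str.lower name = lower then name
    else
      let overlap := PySem.Set.len (PySem.Set.inter owner_tokens
        (PySem.Set.ofList (PySem.Str.split₀ (PySem.Str.lower name))))
      if overlap > best_overlap then pvAltLoop lower owner_tokens rest name overlap
      else pvAltLoop lower owner_tokens rest best_name best_overlap

def normalize_owner_py_alt (owner : String) (known_names : List String) : String :=
  if owner = "" || PySem.Str.upper owner = "UNASSIGNED" then "UNASSIGNED"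
  else if known_names = [] then owner
  else
    let lower := PySem.Str.lower owner
    pvAltLoop lower (PySem.Set.ofList (PySem.Str.split₀ lower)) known_names "UNASSIGNED" 0

-- ===== PRECONDITION & SPEC =====
def Spec_normalize_owner_py (owner : String) (known_names : List String) (out : String) : Prop := out = normalize_owner_py_alt owner known_names
instance (owner : String) (known_names : List String) (out : String) : Decidable (Spec_normalize_owner_py owner known_names out) := by unfold Spec_normalize_owner_py; infer_instance

-- ===== CLAIM (what is proved, stated in full; the proofs are below) =====
def Claim_equal_normalize_owner_py : Prop := ∀ (owner : String) (known_names : List String), Dom_normalize_owner_py owner known_names → Spec_normalize_owner_py owner known_names (normalize_owner_py owner known_names)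

-- ===== LEMMAS AND PROOFS =====

-- A's post-loop step, as a function of the loop state
def pvFinish (st : Option String × Int) : String :=
  match st.1 with
  | some best_name => if best_name ≠ "" ∧ 0 < st.2 then best_name else "UNASSIGNED"
  | none => "UNASSIGNED"

theorem pvOverlap_empty (ot : PySem.Set String) :
    PySem.Set.len (PySem.Set.inter ot (PySem.Set.ofList (PySem.Str.split₀ (PySem.Str.lower "")))) = 0 := by
  have h : PySem.Str.split₀ (PySem.Str.lower "") = [] := by decide
  rw [h]
  simp [PySem.Set.inter, PySem.Set.len, PySem.Set.ofList, PySem.Set.contains]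

-- the loop-fusion invariant: B's single loop equals "A's exact scan, else A's overlap loop finished"
theorem pvLoop_fuse (lower : String) (ot : PySem.Set String) (l : List String)
    (optN : Option String) (b : String) (ov : Int) (hov : 0 ≤ ov)
    (hrel : match optN with
            | some n => b = n ∧ n ≠ "" ∧ 0 < ov
            | none => b = "UNASSIGNED") :
    pvAltLoop lower ot l b ov =
      (match pvExactScan lower l with
       | some name => name
       | none => pvFinish (pvOverlapLoop ot l (optN, ov))) := by
  induction l generalizing optN b ov with
  | nil =>
    simp only [pvAltLoop, pvExactScan, pvOverlapLoop, pvFinish]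
    match optN, hrel with
    | some n, ⟨hb, hn, h0⟩ => simp [hb, hn, h0]
    | none, hb => simp [hb]
  | cons name rest ih =>
    simp only [pvAltLoop, pvExactScan, pvOverlapLoop]
    by_cases hex : lower = PySem.Str.lower name
    · simp [hex]
    · have hex' : ¬ PySem.Str.lower name = lower := fun h => hex h.symm
      simp only [hex, hex', if_neg, if_false]
      set ov' := PySem.Set.len (PySem.Set.inter ot
        (PySem.Set.ofList (PySem.Str.split₀ (PySem.Str.lower name)))) with hov'
      by_cases hgt : ov' > ov
      · have hname : name ≠ "" := by
          intro h
          rw [h] at hov'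
          have := pvOverlap_empty ot
          omega
        rw [if_pos hgt, if_pos hgt]
        exact ih (some name) name ov' (le_of_lt (lt_of_le_of_lt hov hgt))
          ⟨rfl, hname, lt_of_le_of_lt hov hgt⟩
      · rw [if_neg hgt, if_neg hgt]
        exact ih optN b ov hov hrel

-- ===== VERDICT (by name: the statement is the Claim_ definition above) =====
theorem normalize_owner_py_spec : Claim_equal_normalize_owner_py := by
  intro owner known_names _
  unfold Spec_normalize_owner_py normalize_owner_py normalize_owner_py_alt
  by_cases h1 : owner = ""
  · simp [h1]
  · by_cases h2 : PySem.Str.upper owner = "UNASSIGNED"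
    · simp [h1, h2]
    · by_cases h3 : known_names = []
      · simp [h1, h2, h3]
      · simp only [h1, h2, h3, Bool.or_eq_true, decide_eq_true_eq, if_neg, if_false,
          decide_eq_false_iff_not, not_false_iff]
        have := pvLoop_fuse (PySem.Str.lower owner)
          (PySem.Set.ofList (PySem.Str.split₀ (PySem.Str.lower owner))) known_names
          none "UNASSIGNED" 0 le_rfl rfl
        simp only [pvFinish] at this
        simp [this]
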